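-- pv_equiv track=rewrite | github.com/zengjian03/han | 2/lib/资源管理旧.py | _parse_multi_episodes
-- ===== SOURCE A (Python) =====
-- def _parse_multi_episodes(play_url_raw, base_name):
--     """解析多集格式（支持$和#分隔）"""
--     episodes = []
--
--     # 处理多个线路组（$$$分隔）
--     groups = play_url_raw.split('$$$')
--     for group in groups:
--         if not group:
--             continue
--
--         # 处理单组内的多个剧集（#分隔）
--         parts = group.split('#')
--         for part in parts:
--             if not part:
--                 continue
--
--             if '$' in part:
--                 ep_name, ep_url = part.split('$', 1)
--                 episodes.append({
--                     'name': ep_name.strip(),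
--                     'url': ep_url.strip()
--                 })
--             else:
--                 episodes.append({
--                     'name': f"{base_name} - 集{len(episodes)+1}",
--                     'url': part.strip()
--                 })
--
--     return episodes
-- ===== SOURCE B (Python) =====
-- def _parse_multi_episodes(play_url_raw, base_name):
--     """解析多集格式 — single left-to-right character scanner, no split() calls"""
--     episodes = []
--     buf = []
--
--     def emit():
--         tok = ''.join(buf)
--         buf.clear()
--         if not tok:
--             return
--         if '$' in tok:
--             ep_name, ep_url = tok.split('$', 1)
--             episodes.append({'name': ep_name.strip(), 'url': ep_url.strip()})
--         else:
--             episodes.append({'name': f"{base_name} - 集{len(episodes)+1}",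
--                              'url': tok.strip()})
--
--     i, n = 0, len(play_url_raw)
--     while i < n:
--         c = play_url_raw[i]
--         if c == '#':
--             emit()
--             i += 1
--         elif c == '$' and play_url_raw.startswith('$$$', i):
--             emit()
--             i += 3
--         else:
--             buf.append(c)
--             i += 1
--     emit()
--     return episodes
-- ===== Notes on version B (the rewrite author's own statement) =====
-- stated objective: alternative
-- what changed: Replaces A's two nested split('$$$')/split('#') passes with a single left-to-right character scanner that recognises '#' and '$$$' delimiters on the fly, buffering the current token and emitting an episode when a delimiter or the end is reached.
import Mathlib
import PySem

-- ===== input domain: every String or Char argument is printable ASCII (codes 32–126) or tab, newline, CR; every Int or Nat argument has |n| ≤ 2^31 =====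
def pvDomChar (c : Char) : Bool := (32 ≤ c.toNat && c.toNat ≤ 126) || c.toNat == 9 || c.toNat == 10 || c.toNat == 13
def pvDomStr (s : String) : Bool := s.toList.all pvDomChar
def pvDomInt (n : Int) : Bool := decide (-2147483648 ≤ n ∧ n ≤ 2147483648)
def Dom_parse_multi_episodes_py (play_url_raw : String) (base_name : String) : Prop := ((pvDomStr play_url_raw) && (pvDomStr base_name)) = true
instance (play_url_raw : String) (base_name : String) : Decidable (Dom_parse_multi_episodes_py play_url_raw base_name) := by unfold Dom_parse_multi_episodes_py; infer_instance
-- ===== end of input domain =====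

-- B replaces A's two levels of split() calls with a single left-to-right character
-- scanner that recognises '#' and '$$$' delimiters in one pass; same cost, return value proved equal.

-- ===== PORT A =====
-- s.split(sep) for a non-empty literal sep (split? is none only for sep = "", never here)
def pvSplit (s : String) (sep : String) : List String := (PySem.Str.split? s sep).getD []

-- one episode dict from a part that contains '$' (part.split('$', 1); sep ≠ "" so splitMax? is some)
def pvEpDollar (part : String) : List (String × String) :=
  let pieces := (PySem.Str.splitMax? part "$" 1).getD [part]
  [("name", PySem.Str.strip (pieces.getD 0 "")), ("url", PySem.Str.strip (pieces.getD 1 ""))]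

def parse_multi_episodes_py (play_url_raw : String) (base_name : String) : List (List (String × String)) :=
  (pvSplit play_url_raw "$$$").foldl (fun episodes group =>
    if group == "" then episodes
    else
      (pvSplit group "#").foldl (fun episodes part =>
        if part == "" then episodes
        else if PySem.Str.isIn "$" part then
          episodes ++ [pvEpDollar part]
        else
          episodes ++ [[("name", base_name ++ " - 集" ++ PySem.Int.toStr ((episodes.length : Int) + 1)),
                        ("url", PySem.Str.strip part)]]) episodes) []

-- ===== PORT B =====
-- the inner function emit(): flush the buffered token (skip it if empty)
def pvEmit (base_name : String) (episodes : List (List (String × String))) (buf : List Char) :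
    List (List (String × String)) :=
  let tok := String.ofList buf           -- ''.join(buf)
  if tok == "" then episodes
  else if PySem.Str.isIn "$" tok then episodes ++ [pvEpDollar tok]
  else episodes ++ [[("name", base_name ++ " - 集" ++ PySem.Int.toStr ((episodes.length : Int) + 1)),
                     ("url", PySem.Str.strip tok)]]

-- the while-loop: scan the remaining characters, buffering the current token
def pvScan (base_name : String) (cs : List Char) (buf : List Char)
    (episodes : List (List (String × String))) : List (List (String × String)) :=
  match cs with
  | [] => pvEmit base_name episodes buf
  | c :: rest =>
      if c == '#' then pvScan base_name rest [] (pvEmit base_name episodes buf)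
      else if c == '$' && PySem.Chars.startswith (c :: rest) ['$', '$', '$'] then
        pvScan base_name (rest.drop 2) [] (pvEmit base_name episodes buf)   -- i += 3
      else pvScan base_name rest (buf ++ [c]) episodes
termination_by cs.length
decreasing_by
  all_goals simp_wf

def parse_multi_episodes_py_alt (play_url_raw : String) (base_name : String) : List (List (String × String)) :=
  pvScan base_name play_url_raw.toList [] []

-- ===== PRECONDITION & SPEC =====
def Spec_parse_multi_episodes_py (play_url_raw : String) (base_name : String) (out : List (List (String × String))) : Prop := out = parse_multi_episodes_py_alt play_url_raw base_name
instance (play_url_raw : String) (base_name : String) (out : List (List (String × String))) : Decidable (Spec_parse_multi_episodes_py play_url_raw base_name out) := by unfold Spec_parse_multi_episodes_py; infer_instance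

-- ===== CLAIM (what is proved, stated in full; the proofs are below) =====
def Claim_equal_parse_multi_episodes_py : Prop := ∀ (play_url_raw : String) (base_name : String), Dom_parse_multi_episodes_py play_url_raw base_name → Spec_parse_multi_episodes_py play_url_raw base_name (parse_multi_episodes_py play_url_raw base_name)

-- ===== LEMMAS AND PROOFS =====

-- the step both programs perform on one non-empty part
def pvStep (base_name : String) (episodes : List (List (String × String))) (part : String) :
    List (List (String × String)) :=
  if PySem.Str.isIn "$" part then episodes ++ [pvEpDollar part]
  else episodes ++ [[("name", base_name ++ " - 集" ++ PySem.Int.toStr ((episodes.length : Int) + 1)),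
                     ("url", PySem.Str.strip part)]]

-- fuel-indexed reference splitter (mirrors splitOn.go without the accumulator)
def pvMS (sep : List Char) : Nat → List Char → List Char → List (List Char)
  | _, [], cur => [cur.reverse]
  | 0, _ :: _, cur => [cur.reverse]
  | fuel+1, c :: rest, cur =>
      if sep.isPrefixOf (c :: rest) then
        cur.reverse :: pvMS sep fuel (List.drop sep.length (c :: rest)) []
      else pvMS sep fuel rest (c :: cur)

def pvSplitC (sep l : List Char) : List (List Char) := pvMS sep l.length l []

-- all tokens of the two-level split, empty ones included
def pvToks (cs : List Char) : List (List Char) :=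
  (pvSplitC ['$','$','$'] cs).flatMap (fun g => pvSplitC ['#'] g)

theorem pvGo_eq_pvMS (sep : List Char) (hsep : sep ≠ []) :
    ∀ (fuel : Nat) (l cur : List Char) (acc : List (List Char)), l.length ≤ fuel →
      PySem.Chars.splitOn.go sep fuel l cur acc = acc.reverse ++ pvMS sep fuel l cur := by
  intro fuel
  induction fuel with
  | zero =>
      intro l cur acc hl
      have : l = [] := List.length_eq_zero_iff.mp (Nat.le_zero.mp hl)
      subst this
      simp [PySem.Chars.splitOn.go, pvMS]
  | succ fuel ih =>
      intro l cur acc hl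
      match l with
      | [] => simp [PySem.Chars.splitOn.go, pvMS]
      | c :: rest =>
          simp only [PySem.Chars.splitOn.go, pvMS]
          by_cases hp : sep.isPrefixOf (c :: rest)
          · rw [if_pos hp, if_pos hp, ih]
            · simp
            · have hs : 1 ≤ sep.length := by
                cases sep with
                | nil => exact absurd rfl hsep
                | cons a b => simp
              simp only [List.length_drop, List.length_cons] at *
              omega
          · rw [if_neg hp, if_neg hp, ih]
            simp at hl
            omega

theorem pvMS_fuel (sep : List Char) (hsep : sep ≠ []) :
    ∀ (fuel fuel' : Nat) (l cur : List Char), l.length ≤ fuel → l.length ≤ fuel' →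
      pvMS sep fuel l cur = pvMS sep fuel' l cur := by
  intro fuel
  induction fuel with
  | zero =>
      intro fuel' l cur hl _
      have : l = [] := List.length_eq_zero_iff.mp (Nat.le_zero.mp hl)
      subst this
      cases fuel' <;> simp [pvMS]
  | succ fuel ih =>
      intro fuel' l cur hl hl'
      match l with
      | [] => cases fuel' <;> simp [pvMS]
      | c :: rest =>
          match fuel' with
          | 0 => simp at hl'
          | fuel' + 1 =>
              simp only [pvMS]
              have hs : 1 ≤ sep.length := by
                cases sep with
                | nil => exact absurd rfl hsep
                | cons a b => simp
              simp only [List.length_cons] at hl hl'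
              by_cases hp : sep.isPrefixOf (c :: rest)
              · rw [if_pos hp, if_pos hp,
                  ih fuel' (List.drop sep.length (c :: rest)) []
                    (by simp; omega) (by simp; omega)]
              · rw [if_neg hp, if_neg hp, ih fuel' rest (c :: cur) (by omega) (by omega)]

theorem pvSplitOn_eq (sep l : List Char) (hsep : sep ≠ []) :
    PySem.Chars.splitOn l sep = pvSplitC sep l := by
  unfold PySem.Chars.splitOn pvSplitC
  rw [pvGo_eq_pvMS sep hsep (l.length + 1) l [] [] (by omega)]
  rw [pvMS_fuel sep hsep (l.length + 1) l.length l [] (by omega) (by omega)]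
  simp

theorem pvMS_cur (sep : List Char) :
    ∀ (fuel : Nat) (l cur : List Char),
      pvMS sep fuel l cur = (cur.reverse ++ (pvMS sep fuel l []).headI) :: (pvMS sep fuel l []).tail := by
  intro fuel
  induction fuel with
  | zero => intro l cur; cases l <;> simp [pvMS]
  | succ fuel ih =>
      intro l cur
      match l with
      | [] => simp [pvMS]
      | c :: rest =>
          simp only [pvMS]
          by_cases hp : sep.isPrefixOf (c :: rest)
          · rw [if_pos hp, if_pos hp]; simp
          · rw [if_neg hp, if_neg hp, ih rest (c :: cur), ih rest [c]]
            simp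

theorem pvSplitC_nil (sep : List Char) : pvSplitC sep [] = [[]] := rfl

theorem pvSplitC_ne_nil (sep l : List Char) : pvSplitC sep l ≠ [] := by
  unfold pvSplitC
  rw [pvMS_cur sep l.length l []]
  simp

theorem pvSplitC_pos (sep l : List Char) (hsep : sep ≠ []) (h : sep <+: l) :
    pvSplitC sep l = [] :: pvSplitC sep (l.drop sep.length) := by
  have hs : 1 ≤ sep.length := by
    cases sep with
    | nil => exact absurd rfl hsep
    | cons a b => simp
  match l with
  | [] => exact absurd (List.prefix_nil.mp h) hsep
  | c :: rest =>
      unfold pvSplitC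
      simp only [List.length_cons, pvMS]
      rw [if_pos (List.isPrefixOf_iff_prefix.mpr h)]
      rw [pvMS_fuel sep hsep rest.length ((c :: rest).drop sep.length).length
            (List.drop sep.length (c :: rest)) []
            (by simp only [List.length_drop, List.length_cons]; omega) (by omega)]
      simp

theorem pvSplitC_neg (sep : List Char) (c : Char) (rest : List Char) (h : ¬ sep <+: (c :: rest)) :
    pvSplitC sep (c :: rest) = (c :: (pvSplitC sep rest).headI) :: (pvSplitC sep rest).tail := by
  unfold pvSplitC
  simp only [List.length_cons, pvMS]
  rw [if_neg (fun hp => h (List.isPrefixOf_iff_prefix.mp hp))]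
  rw [pvMS_cur sep rest.length rest [c]]
  simp

theorem pvToks_ne_nil (cs : List Char) : pvToks cs ≠ [] := by
  unfold pvToks
  rcases e : pvSplitC ['$','$','$'] cs with _ | ⟨h, t⟩
  · exact absurd e (pvSplitC_ne_nil _ _)
  · rcases e2 : pvSplitC ['#'] h with _ | ⟨h2, t2⟩
    · exact absurd e2 (pvSplitC_ne_nil _ _)
    · simp [e2]

theorem pvToks_nil : pvToks [] = [[]] := rfl

theorem pvToks_hash (cs : List Char) : pvToks ('#' :: cs) = [] :: pvToks cs := by
  unfold pvToks
  rw [pvSplitC_neg ['$','$','$'] '#' cs (by rintro ⟨u, hu⟩; simp at hu)]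
  rcases e : pvSplitC ['$','$','$'] cs with _ | ⟨h, t⟩
  · exact absurd e (pvSplitC_ne_nil _ _)
  · simp only [List.headI, List.tail_cons, List.flatMap_cons]
    rw [pvSplitC_pos ['#'] ('#' :: h) (by simp) (by simp)]
    simp

theorem pvToks_dollar (cs : List Char) (h : ['$','$','$'] <+: cs) :
    pvToks cs = [] :: pvToks (cs.drop 3) := by
  unfold pvToks
  rw [pvSplitC_pos ['$','$','$'] cs (by simp) h]
  simp [pvSplitC_nil]

theorem pvToks_cons (c : Char) (cs : List Char) (hc : c ≠ '#') (h : ¬ ['$','$','$'] <+: (c :: cs)) :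
    pvToks (c :: cs) = (c :: (pvToks cs).headI) :: (pvToks cs).tail := by
  unfold pvToks
  rw [pvSplitC_neg ['$','$','$'] c cs h]
  rcases e : pvSplitC ['$','$','$'] cs with _ | ⟨g, t⟩
  · exact absurd e (pvSplitC_ne_nil _ _)
  · simp only [List.headI, List.tail_cons, List.flatMap_cons]
    rw [pvSplitC_neg ['#'] c g (by rintro ⟨u, hu⟩; simp at hu; exact hc hu.1.symm)]
    rcases e2 : pvSplitC ['#'] g with _ | ⟨h2, t2⟩
    · exact absurd e2 (pvSplitC_ne_nil _ _)
    · simp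

-- emit is "step on the buffer, unless it is empty"
theorem pvEmit_eq (base : String) (eps : List (List (String × String))) (buf : List Char) :
    pvEmit base eps buf = if buf = [] then eps else pvStep base eps (String.ofList buf) := by
  unfold pvEmit pvStep
  by_cases hb : buf = []
  · subst hb
    have h0 : String.ofList ([] : List Char) = "" := rfl
    simp [h0]
  · have hne : ¬ (String.ofList buf = "") := by
      intro he
      apply hb
      have := congrArg String.toList he
      simpa using this
    simp [hne, hb]

theorem pv_foldl_filter_cons {β : Type} (f : β → List Char → β) (x : List Char)
    (l : List (List Char)) (init : β) :
    ((x :: l).filter (· ≠ [])).foldl f init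
      = (l.filter (· ≠ [])).foldl f (if x = [] then init else f init x) := by
  by_cases hx : x = [] <;> simp [hx]

theorem pvScan_eq_aux (base : String) :
    ∀ (n : Nat) (cs buf : List Char) (eps : List (List (String × String))), cs.length ≤ n →
      pvScan base cs buf eps =
        (((buf ++ (pvToks cs).headI) :: (pvToks cs).tail).filter (· ≠ [])).foldl
          (fun e t => pvStep base e (String.ofList t)) eps := by
  intro n
  induction n with
  | zero =>
      intro cs buf eps hl
      have : cs = [] := List.length_eq_zero_iff.mp (Nat.le_zero.mp hl)
      subst this
      rw [pvScan, pvToks_nil, pvEmit_eq, pv_foldl_filter_cons]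
      simp
  | succ n ih =>
      intro cs buf eps hl
      match cs with
      | [] =>
          rw [pvScan, pvToks_nil, pvEmit_eq, pv_foldl_filter_cons]
          simp
      | c :: rest =>
          simp only [List.length_cons, Nat.add_le_add_iff_right] at hl
          rw [pvScan]
          by_cases hc : c = '#'
          · subst hc
            rw [if_pos (show (('#' : Char) == '#') = true by decide)]
            rw [ih rest [] _ hl, pvToks_hash, pvEmit_eq]
            rcases e : pvToks rest with _ | ⟨h, t⟩
            · exact absurd e (pvToks_ne_nil _)
            · simp only [List.append_nil, List.nil_append, List.headI, List.tail_cons]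
              rw [pv_foldl_filter_cons (fun e t => pvStep base e (String.ofList t)) buf (h :: t) eps]
          · rw [if_neg (by simp [hc])]
            by_cases hd : ['$','$','$'] <+: (c :: rest)
            · have hcd : c = '$' := by
                rcases hd with ⟨u, hu⟩
                simp at hu
                exact hu.1.symm
              rw [if_pos (by
                    simp only [hcd, Bool.and_eq_true, beq_iff_eq, true_and]
                    exact (PySem.Chars.startswith_iff _ _).mpr (hcd ▸ hd))]
              have hdrop : (c :: rest).drop 3 = rest.drop 2 := by simp
              rw [ih (rest.drop 2) [] _ (le_trans (by simp) hl),
                  pvToks_dollar (c :: rest) hd, hdrop, pvEmit_eq]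
              rcases e : pvToks (rest.drop 2) with _ | ⟨h, t⟩
              · exact absurd e (pvToks_ne_nil _)
              · simp only [List.append_nil, List.nil_append, List.headI, List.tail_cons]
                rw [pv_foldl_filter_cons (fun e t => pvStep base e (String.ofList t)) buf (h :: t) eps]
            · rw [if_neg (by
                    simp only [Bool.and_eq_true, beq_iff_eq]
                    rintro ⟨-, hs⟩
                    exact hd ((PySem.Chars.startswith_iff _ _).mp hs))]
              rw [ih rest (buf ++ [c]) eps hl, pvToks_cons c rest hc hd]
              rcases e : pvToks rest with _ | ⟨h, t⟩
              · exact absurd e (pvToks_ne_nil _)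
              · simp

-- folding over the non-empty tokens, with the head token possibly continued by buf
theorem pvScan_eq (base : String) :
    ∀ (cs buf : List Char) (eps : List (List (String × String))),
      pvScan base cs buf eps =
        (((buf ++ (pvToks cs).headI) :: (pvToks cs).tail).filter (· ≠ [])).foldl
          (fun e t => pvStep base e (String.ofList t)) eps :=
  fun cs buf eps => pvScan_eq_aux base cs.length cs buf eps le_rfl

-- skipping the falsy elements of a foldl = folding over the filtered list
theorem pv_foldl_skip {α β : Type} (p : α → Bool) (h : β → α → β) (l : List α) (init : β) :
    l.foldl (fun acc x => if p x then acc else h acc x) init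
      = (l.filter (fun x => !(p x))).foldl h init := by
  induction l generalizing init with
  | nil => rfl
  | cons x xs ih => by_cases hx : p x <;> simp [hx, ih]

theorem pv_flatMap_filter {α β : Type} (p : α → Bool) (h : α → List β) (l : List α)
    (hz : ∀ x, p x = false → h x = []) : l.flatMap h = (l.filter p).flatMap h := by
  induction l with
  | nil => rfl
  | cons x xs ih =>
      cases hx : p x
      · simp [hx, ih, hz x hx]
      · simp [hx, ih]

theorem pvSplit_eq (s sep : String) (hsep : sep.toList ≠ []) :
    pvSplit s sep = (pvSplitC sep.toList s.toList).map String.ofList := by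
  unfold pvSplit
  rw [PySem.Str.split?, PySem.Chars.split?]
  rw [if_neg (by simp [List.isEmpty_iff, hsep])]
  rw [pvSplitOn_eq sep.toList s.toList hsep]
  rfl

theorem pvOfList_beq_empty (l : List Char) : (String.ofList l == "") = decide (l = []) := by
  by_cases h : l = []
  · subst h; rfl
  · simp only [h, decide_false]
    simp only [beq_eq_false_iff_ne, ne_eq]
    intro he
    exact h (by simpa using congrArg String.toList he)

theorem pvFilter_ne_map (X : List (List Char)) :
    (X.map String.ofList).filter (fun x => !(x == ""))
      = (X.filter (fun t => t ≠ [])).map String.ofList := by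
  rw [List.filter_map]
  congr 1
  apply List.filter_congr
  intro l _
  simp [Function.comp, pvOfList_beq_empty]

theorem pvA_eq (raw base : String) :
    parse_multi_episodes_py raw base =
      ((pvToks raw.toList).filter (· ≠ [])).foldl (fun e t => pvStep base e (String.ofList t)) [] := by
  unfold parse_multi_episodes_py
  rw [pv_foldl_skip]
  have hfun : (fun (episodes : List (List (String × String))) (group : String) =>
      (pvSplit group "#").foldl (fun episodes part =>
        if part == "" then episodes
        else if PySem.Str.isIn "$" part then episodes ++ [pvEpDollar part]
        else episodes ++ [[("name", base ++ " - 集" ++ PySem.Int.toStr ((episodes.length : Int) + 1)),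
                           ("url", PySem.Str.strip part)]]) episodes)
      = (fun (episodes : List (List (String × String))) (group : String) =>
          ((pvSplit group "#").filter (fun x => !(x == ""))).foldl (pvStep base) episodes) := by
    funext eps g
    rw [pv_foldl_skip]
    rfl
  rw [hfun, ← List.foldl_flatMap]
  have key : ((pvSplit raw "$$$").filter (fun x => !(x == ""))).flatMap
        (fun g => (pvSplit g "#").filter (fun x => !(x == "")))
      = ((pvToks raw.toList).filter (fun t => t ≠ [])).map String.ofList := by
    rw [pvSplit_eq raw "$$$" (by decide), pvFilter_ne_map]
    rw [List.flatMap_map]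
    have hinner : (fun g => (pvSplit (String.ofList g) "#").filter (fun x => !(x == "")))
        = (fun g : List Char => ((pvSplitC ['#'] g).filter (fun t => t ≠ [])).map String.ofList) := by
      funext g
      rw [pvSplit_eq (String.ofList g) "#" (by decide), pvFilter_ne_map]
      simp
    rw [hinner]
    rw [show (fun g : List Char => ((pvSplitC ['#'] g).filter (fun t => t ≠ [])).map String.ofList)
          = (fun g : List Char => List.map String.ofList ((pvSplitC ['#'] g).filter (fun t => t ≠ []))) from rfl]
    rw [← List.map_flatMap]
    congr 1
    unfold pvToks
    rw [List.filter_flatMap]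
    rw [pv_flatMap_filter (fun t => !t.isEmpty) (fun g => (pvSplitC ['#'] g).filter (fun t => t ≠ []))
          (pvSplitC ['$','$','$'] raw.toList)
          (by intro x hx; simp at hx; subst hx; rfl)]
    congr 1
    apply List.filter_congr
    intro l _
    cases l <;> simp
  rw [key, List.foldl_map]

-- ===== VERDICT (by name: the statement is the Claim_ definition above) =====
theorem parse_multi_episodes_py_spec : Claim_equal_parse_multi_episodes_py := by
  intro raw base _
  show parse_multi_episodes_py raw base = parse_multi_episodes_py_alt raw base
  rw [pvA_eq]
  unfold parse_multi_episodes_py_alt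
  rw [pvScan_eq]
  obtain ⟨h, t, ht⟩ : ∃ h t, pvToks raw.toList = h :: t := by
    rcases e : pvToks raw.toList with _ | ⟨h, t⟩
    · exact absurd e (pvToks_ne_nil _)
    · exact ⟨h, t, rfl⟩
  simp [ht]
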